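-- pv_equiv track=rewrite | github.com/rsyi/whale | metaframe/engine/presto_engine.py | _calculate_watermarks
-- ===== SOURCE A (Python) =====
-- from typing import Dict, Iterable, Iterator, List, Optional
--
-- def _calculate_watermarks(
--         partition_names: Iterable,
--         partition_query_rows: List[tuple],
--         watermark_type: str):
--     """
--     Calculates the high and low watermarks from a SqlAlchemyEngine.execute
--     result for the query `select * from schema."table$partitions"`. This result
--     has rows of the form:
--
--     ('2020-02-01', 'Uplift University')
--     ('2020-01-01', 'Uplift University')
--     ('2020-02-01', 'Metaframe College')
--     ('2020-01-01', 'Metaframe College')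
--
--     The column keys are named after the columns that the base table is
--     partitioned on, and the values in the rows correspond to the partition
--     value.
--     """
--     watermark_type = watermark_type.lower()
--
--     # Turn list of rows into list of columns.
--     list_of_partition_values = list(zip(*list(partition_query_rows)))
--
--     watermarks = []
--     for partition_name, partition_values \
--             in zip(partition_names, list_of_partition_values):
--         if watermark_type == 'high_watermark':
--             watermarks.append((partition_name, max(partition_values)))
--         elif watermark_type == 'low_watermark':
--             watermarks.append((partition_name, min(partition_values)))
--     return watermarks
-- ===== SOURCE B (Python) =====
-- def _calculate_watermarks(
--         partition_names,
--         partition_query_rows,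
--         watermark_type):
--     wt = watermark_type.lower()
--     if wt == 'high_watermark':
--         func = max
--     elif wt == 'low_watermark':
--         func = min
--     else:
--         return []
--     rows = list(partition_query_rows)
--     if not rows:
--         return []
--     n = min(len(r) for r in rows)
--     running = list(rows[0][:n])
--     for r in rows[1:]:
--         running = [func(a, b) for a, b in zip(running, r)]
--     return list(zip(partition_names, running))
-- ===== Notes on version B (the rewrite author's own statement) =====
-- stated objective: alternative
-- what changed: Instead of materializing the transposed column list via zip(*rows) and branching on watermark_type inside the loop, B picks the reducer (max/min) once up front and makes a single row-major streaming pass that folds a running per-column watermark vector, finally zipping it with the names.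
import Mathlib
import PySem

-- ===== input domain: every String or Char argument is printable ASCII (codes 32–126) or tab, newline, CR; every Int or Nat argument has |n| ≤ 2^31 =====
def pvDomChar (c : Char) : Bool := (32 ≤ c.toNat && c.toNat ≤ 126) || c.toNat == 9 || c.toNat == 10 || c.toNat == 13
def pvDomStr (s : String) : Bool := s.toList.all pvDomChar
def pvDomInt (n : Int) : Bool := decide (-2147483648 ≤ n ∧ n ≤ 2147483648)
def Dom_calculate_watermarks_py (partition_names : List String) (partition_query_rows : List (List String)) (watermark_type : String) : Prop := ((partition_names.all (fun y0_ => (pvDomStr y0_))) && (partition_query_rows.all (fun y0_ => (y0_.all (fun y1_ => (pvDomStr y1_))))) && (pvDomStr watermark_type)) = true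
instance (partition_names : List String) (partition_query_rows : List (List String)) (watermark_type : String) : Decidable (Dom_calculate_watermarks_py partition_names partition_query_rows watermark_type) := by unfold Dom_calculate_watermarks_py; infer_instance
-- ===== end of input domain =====

-- B replaces A's zip(*rows) transposition + per-column max/min with a single
-- row-major streaming fold of a running watermark vector (reducer chosen once);
-- objective: alternative decomposition, same asymptotic cost.

-- ===== PORT A =====
-- Python's zip(*rows): columns j = 0 .. min(len r) - 1, column j = [r[j] for r in rows]
def zipStarA (rows : List (List String)) : List (List String) :=
  match (rows.map List.length).min? with
  | none => []
  | some n => (List.range n).map (fun j => rows.map (fun r => r.getD j ""))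

def calculate_watermarks_py (partition_names : List String) (partition_query_rows : List (List String)) (watermark_type : String) : List (String × String) :=
  let w := PySem.Str.lower watermark_type
  let cols := zipStarA partition_query_rows
  (List.zip partition_names cols).foldl (fun acc p =>
    if w = "high_watermark" then acc ++ [(p.1, (PySem.List.max? p.2 (fun y => y)).getD "")]
    else if w = "low_watermark" then acc ++ [(p.1, (PySem.List.min? p.2 (fun y => y)).getD "")]
    else acc) []

-- ===== PORT B =====
-- Python max(a, b) / min(a, b) on two arguments (first argument kept on ties)
def pyMax2 (a b : String) : String := if a < b then b else a
def pyMin2 (a b : String) : String := if b < a then b else a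

def calculate_watermarks_py_alt (partition_names : List String) (partition_query_rows : List (List String)) (watermark_type : String) : List (String × String) :=
  let w := PySem.Str.lower watermark_type
  let func? : Option (String → String → String) :=
    if w = "high_watermark" then some pyMax2
    else if w = "low_watermark" then some pyMin2
    else none
  match func?, partition_query_rows with
  | none, _ => []
  | some _, [] => []
  | some f, r0 :: rest =>
      let n := rest.foldl (fun m r => min m r.length) r0.length
      let running := rest.foldl (fun acc r => List.zipWith f acc r) (r0.take n)
      List.zip partition_names running

-- ===== PRECONDITION & SPEC =====
def Spec_calculate_watermarks_py (partition_names : List String) (partition_query_rows : List (List String)) (watermark_type : String) (out : List (String × String)) : Prop := out = calculate_watermarks_py_alt partition_names partition_query_rows watermark_type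
instance (partition_names : List String) (partition_query_rows : List (List String)) (watermark_type : String) (out : List (String × String)) : Decidable (Spec_calculate_watermarks_py partition_names partition_query_rows watermark_type out) := by unfold Spec_calculate_watermarks_py; infer_instance

-- ===== CLAIM (what is proved, stated in full; the proofs are below) =====
def Claim_equal_calculate_watermarks_py : Prop := ∀ (partition_names : List String) (partition_query_rows : List (List String)) (watermark_type : String), Dom_calculate_watermarks_py partition_names partition_query_rows watermark_type → Spec_calculate_watermarks_py partition_names partition_query_rows watermark_type (calculate_watermarks_py partition_names partition_query_rows watermark_type)

-- ===== LEMMAS AND PROOFS =====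

theorem pyMax2_eq_max : pyMax2 = max := by
  funext a b
  simp only [pyMax2, max_def]
  rcases lt_trichotomy a b with h | h | h
  · rw [if_pos h, if_pos h.le]
  · subst h; simp
  · rw [if_neg (not_lt.mpr h.le), if_neg (not_le.mpr h)]

theorem pyMin2_eq_min : pyMin2 = min := by
  funext a b
  simp only [pyMin2, min_def]
  rcases lt_trichotomy a b with h | h | h
  · rw [if_neg (not_lt.mpr h.le), if_pos h.le]
  · subst h; simp
  · rw [if_pos h, if_neg (not_le.mpr h)]

theorem foldl_skip {α β : Type} (l : List α) (a : β) :
    l.foldl (fun acc _ => acc) a = a := by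
  induction l <;> simp_all [List.foldl]

theorem foldl_append_map {α β : Type} (l : List α) (g : α → β) (a : List β) :
    l.foldl (fun acc x => acc ++ [g x]) a = a ++ l.map g := by
  induction l generalizing a with
  | nil => simp
  | cons x t ih => simp [List.foldl, ih]

theorem range_map_getD {α : Type} (acc : List α) (d : α) :
    (List.range acc.length).map (fun j => acc.getD j d) = acc := by
  apply List.ext_getElem
  · simp
  · intro i h1 h2
    simp [List.getElem?_eq_getElem h2]

-- the streaming zipWith-fold computes, per column index, the scalar fold over that column
theorem fold_zipWith_cols (f : String → String → String)
    (rs : List (List String)) (acc : List String)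
    (h : ∀ r ∈ rs, acc.length ≤ r.length) :
    rs.foldl (fun a r => List.zipWith f a r) acc
      = (List.range acc.length).map
          (fun j => rs.foldl (fun v r => f v (r.getD j "")) (acc.getD j "")) := by
  induction rs generalizing acc with
  | nil => exact (range_map_getD acc "").symm
  | cons r rs ih =>
      have hr : acc.length ≤ r.length := h r (by simp)
      have hlen : (List.zipWith f acc r).length = acc.length := by
        simp [List.length_zipWith]; omega
      have := ih (List.zipWith f acc r)
        (by intro r' hr'; rw [hlen]; exact h r' (by simp [hr']))
      simp only [List.foldl, this, hlen]
      apply List.map_congr_left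
      intro j hj
      simp only [List.mem_range] at hj
      congr 1
      rw [List.getD_eq_getElem _ _ (by omega), List.getD_eq_getElem _ _ hj,
          List.getD_eq_getElem _ _ (by omega), List.getElem_zipWith]

theorem min?_lengths (r0 : List String) (rest : List (List String)) :
    ((r0 :: rest).map List.length).min?
      = some (rest.foldl (fun m r => min m r.length) r0.length) := by
  simp [List.min?, List.foldl_map]

theorem zipStarA_cons (r0 : List String) (rest : List (List String)) :
    zipStarA (r0 :: rest)
      = (List.range (rest.foldl (fun m r => min m r.length) r0.length)).map
          (fun j => (r0 :: rest).map (fun r => r.getD j "")) := by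
  rw [zipStarA, min?_lengths]

theorem core_eq (names : List String) (r0 : List String) (rest : List (List String))
    (f : String → String → String)
    (v : List String → String)
    (hvf : ∀ (x : String) (t : List String), v (x :: t) = t.foldl f x) :
    (List.zip names (zipStarA (r0 :: rest))).foldl
        (fun acc p => acc ++ [(p.1, v p.2)]) []
      = List.zip names
          (rest.foldl (fun acc r => List.zipWith f acc r)
            (r0.take (rest.foldl (fun m r => min m r.length) r0.length))) := by
  set n := rest.foldl (fun m r => min m r.length) r0.length with hn
  have hmono : ∀ (l : List (List String)) (m : Nat),
      l.foldl (fun m r => min m r.length) m ≤ m := by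
    intro l
    induction l with
    | nil => simp
    | cons a t ih => intro m; exact le_trans (ih _) (by simp)
  have hnr0 : n ≤ r0.length := hmono rest r0.length
  have hnrest : ∀ r ∈ rest, n ≤ r.length := by
    intro r hr
    have key : ∀ (l : List (List String)) (m : Nat), r ∈ l →
        l.foldl (fun m r => min m r.length) m ≤ r.length := by
      intro l
      induction l with
      | nil => simp
      | cons a t ih =>
          intro m hm
          rcases List.mem_cons.mp hm with hm | hm
          · subst hm
            exact le_trans (hmono t _) (by simp)
          · exact ih _ hm
    exact key rest r0.length hr
  have htake : (r0.take n).length = n := by simp [hnr0]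
  rw [foldl_append_map, List.nil_append,
      fold_zipWith_cols f rest (r0.take n) (by intro r hr; rw [htake]; exact hnrest r hr),
      htake, zipStarA_cons, ← hn, List.zip_map_right, List.zip_map_right, List.map_map]
  apply List.map_congr_left
  intro p hp
  rcases p with ⟨nm, j⟩
  have hj : j < n := List.mem_range.mp (List.of_mem_zip hp).2
  simp only [Function.comp, Prod.map, id]
  congr 1
  have hget : (r0.take n).getD j "" = r0.getD j "" := by
    rw [List.getD_eq_getElem _ _ (by omega), List.getD_eq_getElem _ _ (by omega),
        List.getElem_take]
  rw [List.map_cons, hvf, List.foldl_map, hget]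

-- ===== VERDICT (by name: the statement is the Claim_ definition above) =====
theorem calculate_watermarks_py_spec : Claim_equal_calculate_watermarks_py := by
  intro names rows wt _
  unfold Spec_calculate_watermarks_py calculate_watermarks_py calculate_watermarks_py_alt
  by_cases h1 : PySem.Str.lower wt = "high_watermark"
  · rcases rows with _ | ⟨r0, rest⟩
    · simp [h1, zipStarA]
    · simp only [h1, String.reduceEq, reduceIte]
      rw [core_eq names r0 rest max (fun col => (PySem.List.max? col (fun y => y)).getD "")
            (by intro x t
                simp only [PySem.List.max?_id_cons, Option.getD_some]),
          pyMax2_eq_max]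
  · by_cases h2 : PySem.Str.lower wt = "low_watermark"
    · rcases rows with _ | ⟨r0, rest⟩
      · simp [h2, zipStarA]
      · simp only [h2, String.reduceEq, reduceIte]
        rw [core_eq names r0 rest min (fun col => (PySem.List.min? col (fun y => y)).getD "")
              (by intro x t
                  simp only [PySem.List.min?_id_cons, Option.getD_some]),
            pyMin2_eq_min]
    · simp only [h1, h2, if_false]
      exact foldl_skip _ []
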